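-- pv_equiv track=rewrite | github.com/Dark-OBELIX/code_lycee | pile_sujet0.py | max_pile
-- ===== SOURCE A (Python) =====
-- def creer_pile_vide():
--     pile = []
--     return pile
--
-- def depiler(liste):
--     nombre_d = liste.pop()
--     return nombre_d
--
-- def empiler(liste, nombre):
--     nombre_e = liste.append(nombre)
--
-- def est_vide(liste):
--     if liste:
--         return True
--     else:
--         return False
--
-- def max_pile(P, i):
--     #assert i <= hauteur_pile
--     rang_maxi = 1
--     maxi = depiler(P)
--     rang = 2
--     Q = creer_pile_vide()
--     empiler(Q, maxi)
--     while rang <= i: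
--         x = depiler(P)
--         if x > maxi:
--             maxi = x
--             rang_maxi = rang
--         empiler(Q, x)
--         rang = rang + 1
--     while not (est_vide(Q)):
--         empiler(P, depiler(Q))
--     return rang_maxi
-- ===== SOURCE B (Python) =====
-- def max_pile(P, i):
--     # Collect-then-scan: pop the inspected prefix into vals (top-first), then
--     # one max() + one index() scan. Mutates P like A (A never restores P:
--     # its est_vide is inverted, so its restore loop never runs).
--     vals = [P.pop()]
--     for rang in range(2, i + 1):
--         vals.append(P.pop())
--     return vals.index(max(vals)) + 1
-- ===== Notes on version B (the rewrite author's own statement) =====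
-- stated objective: simpler
-- what changed: Replaced A's online running-max/rank tracking and its dead auxiliary stack Q (plus a never-executing restore loop whose est_vide guard is inverted) with a collect-then-scan decomposition: pop the inspected values into a list, then return vals.index(max(vals)) + 1.
import Mathlib
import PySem

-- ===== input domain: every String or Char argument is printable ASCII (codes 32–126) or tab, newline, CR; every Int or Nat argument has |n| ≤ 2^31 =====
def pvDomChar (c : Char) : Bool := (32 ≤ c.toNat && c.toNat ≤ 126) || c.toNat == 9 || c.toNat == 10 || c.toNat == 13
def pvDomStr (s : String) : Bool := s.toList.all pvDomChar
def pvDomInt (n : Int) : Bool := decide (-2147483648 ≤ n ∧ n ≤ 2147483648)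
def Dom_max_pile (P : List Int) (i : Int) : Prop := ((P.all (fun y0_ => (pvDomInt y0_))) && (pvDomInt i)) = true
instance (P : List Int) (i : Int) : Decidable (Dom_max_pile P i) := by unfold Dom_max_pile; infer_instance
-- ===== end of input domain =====

-- B replaces A's online running-max/rank tracking (with its dead auxiliary stack Q)
-- by a collect-then-scan decomposition: pop the inspected values into a list, then
-- max() + index(). Objective: simpler. Equivalence is about the RETURN value; both
-- versions mutate P identically (A never restores P: its est_vide test is inverted,
-- so its restore loop never runs).


-- ===== PORT A =====
-- loop body: x = depiler(P); update maxi/rang_maxi; empiler(Q, x)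
-- state = (P, maxi, rang_maxi, Q)
def pvStepA (s : List Int × Int × Int × List Int) (rang : Int) : List Int × Int × Int × List Int :=
  match PySem.List.pop? s.1 (-1) with
  | none => s                          -- IndexError (excluded by Pre_)
  | some (x, P') =>
    if s.2.1 < x then (P', x, rang, s.2.2.2 ++ [x]) else (P', s.2.1, s.2.2.1, s.2.2.2 ++ [x])

def max_pile (P : List Int) (i : Int) : Int :=
  match PySem.List.pop? P (-1) with    -- maxi = depiler(P)
  | none => 0                          -- IndexError on empty P (excluded by Pre_)
  | some (maxi, P1) =>
    -- while rang <= i : rang runs 2, 3, …, i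
    let st := (PySem.List.pyRange 2 (i + 1) 1).foldl pvStepA (P1, maxi, 1, [maxi])
    -- final 'while not est_vide(Q)' loop: est_vide returns True on a NONEMPTY list,
    -- and Q here is always nonempty, so the guard is False and the loop never runs.
    st.2.2.1                            -- return rang_maxi

-- ===== PORT B =====
-- loop body: vals.append(P.pop()); state = (P, vals)
def pvStepB (s : List Int × List Int) (_rang : Int) : List Int × List Int :=
  match PySem.List.pop? s.1 (-1) with
  | none => s                          -- IndexError (excluded by Pre_)
  | some (x, P') => (P', s.2 ++ [x])

-- vals.index(max(vals)) + 1
def pvRankOfMax (vals : List Int) : Int :=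
  match PySem.List.max? vals (fun y => y) with
  | none => 0                          -- max([]) raises; vals is never empty here
  | some m => (((PySem.List.index? vals m).getD 0 : Nat) : Int) + 1

def max_pile_alt (P : List Int) (i : Int) : Int :=
  match PySem.List.pop? P (-1) with    -- vals = [P.pop()]
  | none => 0                          -- IndexError on empty P (excluded by Pre_)
  | some (v, P1) =>
    pvRankOfMax ((PySem.List.pyRange 2 (i + 1) 1).foldl pvStepB (P1, [v])).2

-- ===== PRECONDITION & SPEC =====
-- A pops once unconditionally and then i-1 more times: it raises IndexError exactly
-- when P is empty or i exceeds the stack height; those inputs are excluded.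
def Pre_max_pile (P : List Int) (i : Int) : Prop :=
  1 ≤ (P.length : Int) ∧ i ≤ (P.length : Int)
instance (P : List Int) (i : Int) : Decidable (Pre_max_pile P i) := by unfold Pre_max_pile; infer_instance
def pvWitness_max_pile : List Int × Int := ([3, 1, 4, 2], 3)

def Spec_max_pile (P : List Int) (i : Int) (out : Int) : Prop := out = max_pile_alt P i
instance (P : List Int) (i : Int) (out : Int) : Decidable (Spec_max_pile P i out) := by unfold Spec_max_pile; infer_instance

-- ===== CLAIM (what is proved, stated in full; the proofs are below) =====
def Claim_equal_max_pile : Prop := ∀ (P : List Int) (i : Int), Dom_max_pile P i → Pre_max_pile P i → Spec_max_pile P i (max_pile P i)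

-- ===== LEMMAS AND PROOFS =====

-- Loop invariant: running over the same remaining range, A's online (maxi, rang_maxi)
-- equals the rank-of-first-max of B's collected vals, provided maxi is the max of vals,
-- rang_maxi its first index + 1, and the next rank equals vals.length + 1.
lemma pv_loop (n : Nat) :
    ∀ (r0 b : Int) (v : Int) (t P0 : List Int) (maxi rmax : Int) (Q : List Int),
      (b - r0).toNat = n →
      r0 = ((v :: t).length : Int) + 1 →
      b - r0 ≤ (P0.length : Int) →
      PySem.List.max? (v :: t) (fun y => y) = some maxi →
      (∃ k : Nat, PySem.List.index? (v :: t) maxi = some k ∧ rmax = (k : Int) + 1) →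
      ((PySem.List.pyRange r0 b 1).foldl pvStepA (P0, maxi, rmax, Q)).2.2.1 =
        pvRankOfMax ((PySem.List.pyRange r0 b 1).foldl pvStepB (P0, v :: t)).2 := by
  induction n with
  | zero =>
    intro r0 b v t P0 maxi rmax Q hn hr hlen hmax ⟨k, hk, hrm⟩
    have hb : b ≤ r0 := by omega
    rw [PySem.List.pyRange_one_eq_nil hb]
    simp only [List.foldl_nil]
    have hk' : List.idxOf? maxi (v :: t) = some k := by
      simpa [PySem.List.index?_eq_idxOf?] using hk
    simp [pvRankOfMax, hmax, hrm, hk']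
  | succ m ih =>
    intro r0 b v t P0 maxi rmax Q hn hr hlen hmax ⟨k, hk, hrm⟩
    have hb : r0 < b := by omega
    rw [PySem.List.pyRange_one_cons hb]
    simp only [List.foldl_cons]
    -- P0 is nonempty
    have hP0 : P0 ≠ [] := by
      intro h; subst h; simp at hlen; omega
    obtain ⟨x, P', hP0eq⟩ : ∃ x P', P0 = P' ++ [x] :=
      ⟨P0.getLast hP0, P0.dropLast, (List.dropLast_append_getLast hP0).symm⟩
    subst hP0eq
    have hpop : PySem.List.pop? (P' ++ [x]) (-1) = some (x, P') := PySem.List.pop?_last P' x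
    have hmaxi : t.foldl max v = maxi := by
      have := PySem.List.max?_id_cons v t
      rw [hmax] at this; exact (Option.some.inj this).symm
    have hmax' : PySem.List.max? (v :: (t ++ [x])) (fun y => y)
        = some (max maxi x) := by
      have := PySem.List.max?_id_cons v (t ++ [x])
      rw [this]; simp [List.foldl_append, hmaxi]
    by_cases hcmp : maxi < x
    · -- new maximum x at rank r0
      have hA : pvStepA (P' ++ [x], maxi, rmax, Q) r0 = (P', x, r0, Q ++ [x]) := by
        simp [pvStepA, hpop, hcmp]
      have hB : pvStepB (P' ++ [x], v :: t) r0 = (P', v :: t ++ [x]) := by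
        simp [pvStepB, hpop]
      rw [hA, hB]
      have hnotmem : x ∉ v :: t := by
        intro hmem
        have := PySem.List.max?_isMax hmax x hmem
        simp at this; omega
      have hidx : PySem.List.index? ((v :: t) ++ [x]) x = some (v :: t).length :=
        PySem.List.index?_append_singleton_self (v :: t) x hnotmem
      have := ih (r0 + 1) b v (t ++ [x]) P' x r0 (Q ++ [x])
        (by omega)
        (by simp at hr ⊢; omega)
        (by simp at hlen ⊢; omega)
        (by rw [hmax']; congr 1; omega)
        ⟨(v :: t).length, by simpa using hidx, by simp at hr ⊢; omega⟩
      simpa using this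
    · -- maximum unchanged
      have hA : pvStepA (P' ++ [x], maxi, rmax, Q) r0 = (P', maxi, rmax, Q ++ [x]) := by
        simp [pvStepA, hpop, hcmp]
      have hB : pvStepB (P' ++ [x], v :: t) r0 = (P', v :: t ++ [x]) := by
        simp [pvStepB, hpop]
      rw [hA, hB]
      have hmem : maxi ∈ v :: t := PySem.List.max?_mem hmax
      have hidx : PySem.List.index? ((v :: t) ++ [x]) maxi = PySem.List.index? (v :: t) maxi :=
        PySem.List.index?_append_of_mem [x] hmem
      have := ih (r0 + 1) b v (t ++ [x]) P' maxi rmax (Q ++ [x])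
        (by omega)
        (by simp at hr ⊢; omega)
        (by simp at hlen ⊢; omega)
        (by rw [hmax']; congr 1; omega)
        ⟨k, by rw [← hk, ← hidx]; rfl, hrm⟩
      simpa using this

-- ===== VERDICT (by name: the statement is the Claim_ definition above) =====
theorem max_pile_spec : Claim_equal_max_pile := by
  intro P i _ hPre
  obtain ⟨h1, h2⟩ := hPre
  have hP : P ≠ [] := by
    intro h; subst h; simp at h1
  obtain ⟨v, P1, hPeq⟩ : ∃ v P1, P = P1 ++ [v] :=
    ⟨P.getLast hP, P.dropLast, (List.dropLast_append_getLast hP).symm⟩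
  subst hPeq
  unfold Spec_max_pile max_pile max_pile_alt
  rw [PySem.List.pop?_last]
  exact pv_loop (i + 1 - 2).toNat 2 (i + 1) v [] P1 v 1 [v] rfl (by simp)
    (by simp at h2 ⊢; omega)
    (by rw [PySem.List.max?_id_cons]; rfl)
    ⟨0, by simp, by omega⟩
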